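-- pv_equiv track=rewrite | github.com/goshng/polap | src/polaplib/polap-py-select-mt-by-x-and-kmer.py | hpc_compress
-- ===== SOURCE A (Python) =====
-- def hpc_compress(seq: str) -> str:
--     out = []
--     prev = ""
--     for c in seq.upper():
--         if c not in "ACGT":
--             prev = ""
--             continue
--         if c != prev:
--             out.append(c)
--             prev = c
--     return "".join(out)
-- ===== SOURCE B (Python) =====
-- def hpc_compress(seq: str) -> str:
--     # Two staged passes instead of one stateful loop:
--     # 1) collapse EVERY maximal run of equal characters (valid or not) to a single
--     #    character, by keeping each character that differs from its predecessor;
--     # 2) delete the non-ACGT characters.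
--     # A run of invalid characters collapses to one separator which pass 2 removes,
--     # which is exactly A's prev="" reset behaviour.
--     s = seq.upper()
--     collapsed = s[:1] + "".join(c for c, p in zip(s[1:], s) if c != p)
--     return "".join(c for c in collapsed if c in "ACGT")
-- ===== Notes on version B (the rewrite author's own statement) =====
-- stated objective: alternative
-- what changed: Replaced A's single stateful loop (prev tracking with reset on invalid chars) by two staged stateless passes: first collapse every maximal run of equal characters via a zip-with-predecessor comparison, then filter to ACGT; invalid runs collapse to one separator that the filter removes, reproducing A's reset.
import Mathlib
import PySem

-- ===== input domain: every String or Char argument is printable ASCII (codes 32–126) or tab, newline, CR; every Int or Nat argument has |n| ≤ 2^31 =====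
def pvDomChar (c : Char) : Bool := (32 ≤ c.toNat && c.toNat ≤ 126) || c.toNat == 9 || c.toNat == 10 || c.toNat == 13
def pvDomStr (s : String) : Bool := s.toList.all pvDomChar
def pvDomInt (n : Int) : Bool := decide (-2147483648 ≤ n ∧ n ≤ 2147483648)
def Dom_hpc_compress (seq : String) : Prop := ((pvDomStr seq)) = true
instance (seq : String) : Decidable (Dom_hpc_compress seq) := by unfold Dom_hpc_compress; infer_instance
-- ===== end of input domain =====

-- B replaces A's stateful prev-tracking loop by two staged stateless passes
-- (collapse all runs via zip-with-predecessor, then filter to ACGT); objective: alternative.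

-- ===== PORT A =====
-- prev = "" is modeled as none, prev = c as some c; out grows by append as in Python.
def hpcStepA (st : List Char × Option Char) (c : Char) : List Char × Option Char :=
  if !("ACGT".toList.contains c) then (st.1, none)
  else if some c ≠ st.2 then (st.1 ++ [c], some c)
  else st

def hpc_compress (seq : String) : String :=
  String.mk (((PySem.Str.upper seq).toList.foldl hpcStepA ([], none)).1)

-- ===== PORT B =====
-- s[:1] on a string is List.take 1 (exact for the nonnegative bound 1);
-- zip(s[1:], s) is (l.drop 1).zip l, pairing each character with its predecessor.
def hpc_compress_alt (seq : String) : String :=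
  let l := (PySem.Str.upper seq).toList
  let collapsed :=
    l.take 1 ++ (((l.drop 1).zip l).filter (fun q => q.1 ≠ q.2)).map Prod.fst
  String.mk (collapsed.filter (fun c => "ACGT".toList.contains c))

-- ===== PRECONDITION & SPEC =====
def Spec_hpc_compress (seq : String) (out : String) : Prop := out = hpc_compress_alt seq
instance (seq : String) (out : String) : Decidable (Spec_hpc_compress seq out) := by unfold Spec_hpc_compress; infer_instance

-- ===== CLAIM (what is proved, stated in full; the proofs are below) =====
def Claim_equal_hpc_compress : Prop := ∀ (seq : String), Dom_hpc_compress seq → Spec_hpc_compress seq (hpc_compress seq)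

-- ===== LEMMAS AND PROOFS =====

-- the validity predicate, named so that simp does not unfold it mid-proof
def hpcV (k : Char) : Bool := "ACGT".toList.contains k

-- reference function: what A's loop appends after state prev, in direct recursion
def hpcGref : Option Char → List Char → List Char
  | _, [] => []
  | prev, c :: cs =>
    if hpcV c then
      (if some c ≠ prev then c :: hpcGref (some c) cs else hpcGref (some c) cs)
    else hpcGref none cs

theorem hpcStepA_invalid (out : List Char) (p : Option Char) (c : Char)
    (hv : hpcV c = false) : hpcStepA (out, p) c = (out, none) := by
  have h : "ACGT".toList.contains c = false := hv
  have h' : (!"ACGT".toList.contains c) = true := by rw [h]; rfl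
  unfold hpcStepA
  rw [if_pos h']

theorem hpcStepA_keep (out : List Char) (p : Option Char) (c : Char)
    (hv : hpcV c = true) (hp : some c = p) : hpcStepA (out, p) c = (out, p) := by
  have h : "ACGT".toList.contains c = true := hv
  have h' : ¬ ((!"ACGT".toList.contains c) = true) := by rw [h]; simp
  unfold hpcStepA
  rw [if_neg h', if_neg (not_not_intro hp)]

theorem hpcStepA_push (out : List Char) (p : Option Char) (c : Char)
    (hv : hpcV c = true) (hp : ¬ some c = p) : hpcStepA (out, p) c = (out ++ [c], some c) := by
  have h : "ACGT".toList.contains c = true := hv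
  have h' : ¬ ((!"ACGT".toList.contains c) = true) := by rw [h]; simp
  unfold hpcStepA
  rw [if_neg h', if_pos hp]

theorem hpc_foldA (l : List Char) : ∀ (out : List Char) (p : Option Char),
    (l.foldl hpcStepA (out, p)).1 = out ++ hpcGref p l := by
  induction l with
  | nil => intro out p; simp [hpcGref]
  | cons c cs ih =>
    intro out p
    rw [List.foldl_cons]
    by_cases hv : hpcV c = true
    · by_cases hp : some c = p
      · rw [hpcStepA_keep out p c hv hp, ih]
        simp only [hpcGref, hv, if_true]
        rw [if_neg (not_not_intro hp), hp]
      · rw [hpcStepA_push out p c hv hp, ih]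
        simp only [hpcGref, hv, if_true]
        rw [if_pos hp]
        simp
    · rw [hpcStepA_invalid out p c (Bool.eq_false_iff.mpr hv), ih]
      simp only [hpcGref]
      rw [if_neg hv]

-- recursive form of B's first pass seeded with predecessor p
def hpcZp : Char → List Char → List Char
  | _, [] => []
  | p, c :: cs => (if c ≠ p then [c] else []) ++ hpcZp c cs

theorem hpc_zip_Zp (l : List Char) : ∀ (p : Char),
    ((l.zip (p :: l)).filter (fun q : Char × Char => q.1 ≠ q.2)).map Prod.fst = hpcZp p l := by
  induction l with
  | nil => intro p; simp [hpcZp]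
  | cons c cs ih =>
    intro p
    rw [hpcZp, List.zip_cons_cons]
    by_cases h : c = p
    · rw [List.filter_cons_of_neg (by simp [h]), ih, if_neg (not_not_intro h)]
      simp
    · rw [List.filter_cons_of_pos (by simp [h]), List.map_cons, ih, if_pos h]
      simp

-- B's collapsed list on c :: cs
theorem hpc_collapseB_cons (c : Char) (cs : List Char) :
    (c :: cs).take 1 ++ ((((c :: cs).drop 1).zip (c :: cs)).filter
        (fun q : Char × Char => q.1 ≠ q.2)).map Prod.fst = c :: hpcZp c cs := by
  simp only [List.take_succ_cons, List.take_zero, List.drop_succ_cons, List.drop_zero]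
  rw [hpc_zip_Zp]
  simp

-- abbreviation for B's full result on a char list
def hpcB (l : List Char) : List Char :=
  (l.take 1 ++ (((l.drop 1).zip l).filter (fun q : Char × Char => q.1 ≠ q.2)).map Prod.fst).filter hpcV

theorem hpcB_cons (c : Char) (cs : List Char) :
    hpcB (c :: cs) = (c :: hpcZp c cs).filter hpcV := by
  unfold hpcB
  rw [hpc_collapseB_cons]

-- after an invalid character, the seeded pass agrees with B up to the filter
theorem hpc_invalid_seed (c : Char) (hv : hpcV c = false) (cs : List Char) :
    (hpcZp c cs).filter hpcV = hpcB cs := by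
  cases cs with
  | nil => simp [hpcZp, hpcB]
  | cons d r =>
    rw [hpcB_cons, hpcZp]
    by_cases h : d = c
    · subst h
      rw [if_neg (not_not_intro rfl)]
      simp [hv]
    · rw [if_pos h]
      simp

-- main invariant: A's reference loop equals B's passes, for both loop states
theorem hpc_main (l : List Char) :
    (hpcGref none l = hpcB l) ∧
    (∀ p : Char, hpcV p = true → hpcGref (some p) l = (hpcZp p l).filter hpcV) := by
  induction l with
  | nil => exact ⟨by simp [hpcGref, hpcB], fun p _ => by simp [hpcGref, hpcZp]⟩
  | cons c cs ih =>
    constructor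
    · rw [hpcB_cons]
      by_cases hv : hpcV c = true
      · simp only [hpcGref, hv, if_true]
        rw [if_pos (by simp), List.filter_cons_of_pos (by simp [hv]), (ih.2) c hv]
      · simp only [hpcGref]
        rw [if_neg hv, List.filter_cons_of_neg (by simp [Bool.eq_false_iff.mpr hv]), ih.1,
          hpc_invalid_seed c (Bool.eq_false_iff.mpr hv) cs]
    · intro p hp
      rw [hpcZp]
      by_cases hv : hpcV c = true
      · by_cases h : c = p
        · subst h
          simp only [hpcGref, hv, if_true]
          rw [if_neg (by simp), if_neg (not_not_intro rfl)]
          simp only [List.nil_append]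
          exact (ih.2) c hv
        · simp only [hpcGref, hv, if_true]
          rw [if_pos (by simp [h]), if_pos h, (ih.2) c hv]
          simp [hv]
      · have hcp : c ≠ p := fun e => hv (e ▸ hp)
        simp only [hpcGref]
        rw [if_neg hv, if_pos hcp, List.singleton_append,
          List.filter_cons_of_neg (by simp [Bool.eq_false_iff.mpr hv]), ih.1,
          hpc_invalid_seed c (Bool.eq_false_iff.mpr hv) cs]

-- ===== VERDICT (by name: the statement is the Claim_ definition above) =====
theorem hpc_compress_spec : Claim_equal_hpc_compress := by
  intro seq _
  unfold Spec_hpc_compress hpc_compress hpc_compress_alt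
  rw [hpc_foldA]
  simp only [List.nil_append]
  rw [(hpc_main (PySem.Str.upper seq).toList).1]
  rfl
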